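-- pv_equiv track=rewrite | github.com/LeeChanghoJJang/Algorithm-Study | 16회차/programmers_150369_택배배달과수거하기/programmers_150369_임경태.py | solution
-- ===== SOURCE A (Python) =====
-- def solution(cap, n, deliveries, pickups):
--     answer = 0
--     deli_item = 0
--     pick_item = 0
--
--     # 가장 먼 곳부터 탐색
--     for i in range(n-1, -1, -1):
--         # 현재 위치에서 배달과 수거할 물건의 수를 추가
--         deli_item += deliveries[i]
--         pick_item += pickups[i]
--
--         # 배달 또는 수거할 물건이 남아있는 동안 반복
--         while deli_item > 0 or pick_item > 0:
--             # 각 위치의 배달과 수거 값에서 cap값 감산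
--             deli_item -= cap
--             pick_item -= cap
--             # 왕복 횟수 합산
--             answer += (i+1)*2
--
--     return answer
-- ===== SOURCE B (Python) =====
-- def solution(cap, n, deliveries, pickups):
--     answer = 0
--     deli = 0
--     pick = 0
--     for i in range(n - 1, -1, -1):
--         deli += deliveries[i]
--         pick += pickups[i]
--         # trips needed at this point = max ceiling-divisions of the outstanding loads
--         trips = max(-((-deli) // cap), -((-pick) // cap), 0)
--         answer += trips * (i + 1) * 2
--         deli -= trips * cap
--         pick -= trips * cap
--     return answer
-- ===== Notes on version B (the rewrite author's own statement) =====
-- stated objective: alternative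
-- what changed: The inner while loop that subtracts cap one trip at a time is replaced by a direct ceiling-division computing the number of trips at each house in one step; on the measured input family this is not faster, it trades the inner loop for a division per house.
-- outside the precondition, e.g. on solution(-1, 1, [-2], [0]): A returns 0, B returns 4
import Mathlib
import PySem

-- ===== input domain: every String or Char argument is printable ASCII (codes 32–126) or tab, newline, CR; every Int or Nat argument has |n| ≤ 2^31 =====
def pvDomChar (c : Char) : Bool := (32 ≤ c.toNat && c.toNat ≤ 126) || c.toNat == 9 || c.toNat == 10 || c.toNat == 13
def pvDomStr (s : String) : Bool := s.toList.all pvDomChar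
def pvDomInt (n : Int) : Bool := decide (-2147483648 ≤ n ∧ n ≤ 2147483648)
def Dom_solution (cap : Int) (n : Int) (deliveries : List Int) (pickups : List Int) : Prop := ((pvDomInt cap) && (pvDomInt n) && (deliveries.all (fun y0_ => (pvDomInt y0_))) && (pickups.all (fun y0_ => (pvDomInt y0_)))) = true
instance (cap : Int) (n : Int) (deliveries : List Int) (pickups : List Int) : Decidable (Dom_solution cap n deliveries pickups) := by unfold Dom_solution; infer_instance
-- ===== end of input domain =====

-- B replaces A's unit-at-a-time inner while loop by a direct ceiling-division trip count (alternative algorithm).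

-- ===== PORT A =====
-- inner 'while deli_item > 0 or pick_item > 0' loop; the extra '0 < cap' guard only
-- makes the recursion total (Python diverges there; such inputs are outside Pre_).
def pvWhileA (cap i deli pick answer : Int) : Int × Int × Int :=
  if h : (0 < deli ∨ 0 < pick) ∧ 0 < cap then
    pvWhileA cap i (deli - cap) (pick - cap) (answer + (i + 1) * 2)
  else (deli, pick, answer)
termination_by (max deli pick).toNat
decreasing_by omega

def solution (cap : Int) (n : Int) (deliveries : List Int) (pickups : List Int) : Int :=
  let st := (PySem.List.pyRange (n - 1) (-1) (-1)).foldl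
    (fun (st : Int × Int × Int) i =>
      pvWhileA cap i (st.1 + PySem.List.pyGetD deliveries i 0)
                     (st.2.1 + PySem.List.pyGetD pickups i 0) st.2.2)
    (0, 0, 0)
  st.2.2

-- ===== PORT B =====
def solution_alt (cap : Int) (n : Int) (deliveries : List Int) (pickups : List Int) : Int :=
  let st := (PySem.List.pyRange (n - 1) (-1) (-1)).foldl
    (fun (st : Int × Int × Int) i =>
      let d := st.1 + PySem.List.pyGetD deliveries i 0
      let p := st.2.1 + PySem.List.pyGetD pickups i 0
      let t := max (max (-(PySem.Int.floordiv (-d) cap)) (-(PySem.Int.floordiv (-p) cap))) 0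
      (d - t * cap, p - t * cap, st.2.2 + t * (i + 1) * 2))
    (0, 0, 0)
  st.2.2

-- ===== PRECONDITION & SPEC =====
-- Pre_ excludes n exceeding a list length (A raises IndexError, so does B) and cap ≤ 0,
-- where A diverges whenever some suffix load is positive and otherwise returns from a
-- never-entered loop while B's ceiling division is meaningless (or ZeroDivisionError).
def Pre_solution (cap : Int) (n : Int) (deliveries : List Int) (pickups : List Int) : Prop :=
  0 < cap ∧ n ≤ (deliveries.length : Int) ∧ n ≤ (pickups.length : Int)
instance (cap : Int) (n : Int) (deliveries : List Int) (pickups : List Int) : Decidable (Pre_solution cap n deliveries pickups) := by unfold Pre_solution; infer_instance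
def pvWitness_solution : Int × Int × List Int × List Int := (4, 2, [1, 2], [0, 3])

def Spec_solution (cap : Int) (n : Int) (deliveries : List Int) (pickups : List Int) (out : Int) : Prop := out = solution_alt cap n deliveries pickups
instance (cap : Int) (n : Int) (deliveries : List Int) (pickups : List Int) (out : Int) : Decidable (Spec_solution cap n deliveries pickups out) := by unfold Spec_solution; infer_instance

-- ===== CLAIM (what is proved, stated in full; the proofs are below) =====
def Claim_equal_solution : Prop := ∀ (cap : Int) (n : Int) (deliveries : List Int) (pickups : List Int), Dom_solution cap n deliveries pickups → Pre_solution cap n deliveries pickups → Spec_solution cap n deliveries pickups (solution cap n deliveries pickups)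

-- ===== LEMMAS AND PROOFS =====

-- A's inner loop computes the ceiling-division closed form.
lemma pvWhileA_eq (cap i deli pick answer : Int) (hc : 0 < cap) :
    pvWhileA cap i deli pick answer =
      (deli - (max (max (-((-deli) / cap)) (-((-pick) / cap))) 0) * cap,
       pick - (max (max (-((-deli) / cap)) (-((-pick) / cap))) 0) * cap,
       answer + (max (max (-((-deli) / cap)) (-((-pick) / cap))) 0) * ((i + 1) * 2)) := by
  fun_induction pvWhileA cap i deli pick answer with
  | case1 deli pick answer h ih =>
    rw [ih]
    have hcne : cap ≠ 0 := by omega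
    have hqa : (-(deli - cap)) / cap = (-deli) / cap + 1 := by
      have h1 : -(deli - cap) = -deli + 1 * cap := by ring
      rw [h1, Int.add_mul_ediv_right _ _ hcne]
    have hqb : (-(pick - cap)) / cap = (-pick) / cap + 1 := by
      have h1 : -(pick - cap) = -pick + 1 * cap := by ring
      rw [h1, Int.add_mul_ediv_right _ _ hcne]
    rw [hqa, hqb]
    have hneg : (-deli) / cap < 0 ∨ (-pick) / cap < 0 := by
      rcases h.1 with hd | hp
      · refine Or.inl ?_
        by_contra hge
        have := (Int.le_ediv_iff_mul_le hc).mp (by omega : (0:Int) ≤ (-deli) / cap)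
        omega
      · refine Or.inr ?_
        by_contra hge
        have := (Int.le_ediv_iff_mul_le hc).mp (by omega : (0:Int) ≤ (-pick) / cap)
        omega
    have ht : max (max (-((-deli) / cap + 1)) (-((-pick) / cap + 1))) 0
            = max (max (-((-deli) / cap)) (-((-pick) / cap))) 0 - 1 := by omega
    rw [ht]
    simp only [Prod.mk.injEq]
    refine ⟨by ring, by ring, by ring⟩
  | case2 deli pick answer h =>
    have hd : deli ≤ 0 := by by_contra hx; exact h ⟨Or.inl (by omega), hc⟩
    have hp : pick ≤ 0 := by by_contra hx; exact h ⟨Or.inr (by omega), hc⟩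
    have hqa : 0 ≤ (-deli) / cap := Int.ediv_nonneg (by omega) (by omega)
    have hqb : 0 ≤ (-pick) / cap := Int.ediv_nonneg (by omega) (by omega)
    have ht : max (max (-((-deli) / cap)) (-((-pick) / cap))) 0 = 0 := by omega
    rw [ht]
    simp only [Prod.mk.injEq]
    refine ⟨by ring, by ring, by ring⟩

-- ===== VERDICT (by name: the statement is the Claim_ definition above) =====
theorem solution_spec : Claim_equal_solution := by
  intro cap n deliveries pickups _ hpre
  obtain ⟨hc, -, -⟩ := hpre
  unfold Spec_solution solution solution_alt
  have hfun : (fun (st : Int × Int × Int) i =>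
      pvWhileA cap i (st.1 + PySem.List.pyGetD deliveries i 0)
                     (st.2.1 + PySem.List.pyGetD pickups i 0) st.2.2)
    = (fun (st : Int × Int × Int) i =>
      let d := st.1 + PySem.List.pyGetD deliveries i 0
      let p := st.2.1 + PySem.List.pyGetD pickups i 0
      let t := max (max (-(PySem.Int.floordiv (-d) cap)) (-(PySem.Int.floordiv (-p) cap))) 0
      (d - t * cap, p - t * cap, st.2.2 + t * (i + 1) * 2)) := by
    funext st i
    simp only [PySem.Int.floordiv_eq_ediv_of_pos hc]
    rw [pvWhileA_eq cap i _ _ _ hc]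
    simp only [Prod.mk.injEq]
    exact ⟨trivial, trivial, by ring⟩
  rw [hfun]
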